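-- pv_equiv track=rewrite | github.com/need-singularity/sylvian-singularity | math/frontier_1400_verify.py | class_number_neg
-- ===== SOURCE A (Python) =====
-- def class_number_neg(n):
--     """Approximate class number h(-n) for fundamental discriminants"""
--     if n <= 0: return 0
--     D = -n if n%4==3 else -4*n
--     h = 0
--     for a in range(1, int(abs(D)**0.5)+1):
--         for b in range(-a, a+1):
--             c_num = b*b - D
--             if c_num % (4*a) == 0:
--                 c = c_num // (4*a)
--                 if c >= a and (b >= 0 if a == c else True):
--                     h += 1
--     return max(h, 1)
-- ===== SOURCE B (Python) =====
-- def class_number_neg(n):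
--     """Approximate class number h(-n) for fundamental discriminants"""
--     if n <= 0: return 0
--     D = -n if n % 4 == 3 else -4 * n
--     A = int(abs(D) ** 0.5)
--     h = 0
--     for b in range(-A, A + 1):               # b outer
--         m = b * b - D
--         if m % 4:                            # 4*a | m needs 4 | m
--             continue
--         q = m // 4
--         # a must be a divisor of q with |b| <= a and a*a <= q  (a <= c);
--         # such an a automatically satisfies a <= A, so no explicit cap is needed
--         for a in range(max(1, abs(b)), int(q ** 0.5) + 1):
--             if q % a == 0 and (b >= 0 or a * a != q):
--                 h += 1
--     return max(h, 1)
-- ===== Notes on version B (the rewrite author's own statement) =====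
-- stated objective: faster
-- what changed: B inverts the loop nest: it iterates b outer over [-A,A], skips b unless b*b-D is divisible by four, and finds a by trial division over the divisors of q (the quarter of b*b-D) in [max(one,|b|), isqrt(q)] (the bound a*a<=q replaces A's c>=a test and makes A's explicit a<=A cap redundant), instead of A's scan of every a in [one,A] with every b in [-a,a].
import Mathlib
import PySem

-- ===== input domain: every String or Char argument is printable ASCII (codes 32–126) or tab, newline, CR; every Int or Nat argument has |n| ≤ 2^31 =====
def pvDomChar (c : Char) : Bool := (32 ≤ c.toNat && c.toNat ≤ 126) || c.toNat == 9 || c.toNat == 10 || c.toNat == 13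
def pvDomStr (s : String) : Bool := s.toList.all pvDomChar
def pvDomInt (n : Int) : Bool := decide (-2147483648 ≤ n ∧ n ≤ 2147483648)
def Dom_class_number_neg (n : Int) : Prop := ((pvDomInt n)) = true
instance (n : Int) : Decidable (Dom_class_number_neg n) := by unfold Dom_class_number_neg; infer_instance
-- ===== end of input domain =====

-- B inverts A's loop nest: b runs outer, and a is found by trial division over the divisors of
-- (b*b-D)//4 up to its integer square root (no explicit a ≤ ⌊√|D|⌋ cap); measured faster by a
-- constant factor. Proved: identical return value for every n in the domain.


-- ===== PORT A =====
-- int(abs(D)**0.5) is ported as the integer square root: exact on the stated domain,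
-- where |D| ≤ 2^33 < 2^52 keeps the float-sqrt truncation equal to isqrt.
def class_number_neg (n : Int) : Int :=
  if n ≤ 0 then 0
  else
    let D : Int := if PySem.Int.mod n 4 = 3 then -n else -4 * n
    let h : Int :=
      (PySem.List.pyRange 1 ((Nat.sqrt D.natAbs : Int) + 1) 1).foldl (fun h a =>
        (PySem.List.pyRange (-a) (a + 1) 1).foldl (fun h b =>
          let c_num := b * b - D
          if PySem.Int.mod c_num (4 * a) = 0 then
            let c := PySem.Int.floordiv c_num (4 * a)
            if c ≥ a ∧ (if a = c then b ≥ 0 else True) then h + 1 else h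
          else h) h) 0
    max h 1

-- ===== PORT B =====
-- int(x**0.5) again ported as the integer square root (exact on the domain, as above).
def class_number_neg_alt (n : Int) : Int :=
  if n ≤ 0 then 0
  else
    let D : Int := if PySem.Int.mod n 4 = 3 then -n else -4 * n
    let A : Int := (Nat.sqrt D.natAbs : Int)
    let h : Int :=
      (PySem.List.pyRange (-A) (A + 1) 1).foldl (fun h b =>
        let m := b * b - D
        if PySem.Int.mod m 4 ≠ 0 then h   -- `if m % 4: continue`
        else
          let q := PySem.Int.floordiv m 4
          (PySem.List.pyRange (max 1 |b|) ((Nat.sqrt q.toNat : Int) + 1) 1).foldl (fun h a =>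
            if PySem.Int.mod q a = 0 ∧ (b ≥ 0 ∨ a * a ≠ q) then h + 1 else h) h) 0
    max h 1

-- ===== PRECONDITION & SPEC =====
def Spec_class_number_neg (n : Int) (out : Int) : Prop := out = class_number_neg_alt n
instance (n : Int) (out : Int) : Decidable (Spec_class_number_neg n out) := by unfold Spec_class_number_neg; infer_instance

-- ===== CLAIM (what is proved, stated in full; the proofs are below) =====
def Claim_equal_class_number_neg : Prop := ∀ (n : Int), Dom_class_number_neg n → Spec_class_number_neg n (class_number_neg n)

-- ===== LEMMAS AND PROOFS =====

-- the discriminant, its root bound, and the upper end of B's inner (trial-division) range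
def pvD (n : Int) : Int := if PySem.Int.mod n 4 = 3 then -n else -4 * n
def pvA (D : Int) : Int := (Nat.sqrt D.natAbs : Int)
def pvHi (D b : Int) : Int := (Nat.sqrt (PySem.Int.floordiv (b * b - D) 4).toNat : Int)

-- A's inner test at (a, b) and B's inner test at (b, a)  (abbrev: keeps decidability inferable)
abbrev pvPA (D a b : Int) : Prop :=
  PySem.Int.mod (b * b - D) (4 * a) = 0 ∧
  a ≤ PySem.Int.floordiv (b * b - D) (4 * a) ∧
  (a = PySem.Int.floordiv (b * b - D) (4 * a) → 0 ≤ b)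
abbrev pvPB (D b a : Int) : Prop :=
  PySem.Int.mod (PySem.Int.floordiv (b * b - D) 4) a = 0 ∧
  (0 ≤ b ∨ a * a ≠ PySem.Int.floordiv (b * b - D) 4)
def pvFA (D a b : Int) : Int := if pvPA D a b then 1 else 0
def pvFB (D b a : Int) : Int := if pvPB D b a then 1 else 0

lemma pv_Icc_succ_right {a b : Int} (h : a ≤ b + 1) :
    Finset.Icc a (b + 1) = insert (b + 1) (Finset.Icc a b) := by
  ext x; simp [Finset.mem_Icc, Finset.mem_insert]; omega

-- a Python `for x in range(a, b)` accumulation is a sum over Finset.Icc a (b-1)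
lemma pv_sum_pyRange (g : Int → Int) (a b : Int) :
    ((PySem.List.pyRange a b 1).map g).sum = ∑ x ∈ Finset.Icc a (b - 1), g x := by
  by_cases h : b ≤ a
  · rw [PySem.List.pyRange_one_eq_nil h, Finset.Icc_eq_empty (by omega)]; simp
  · rw [not_le] at h
    obtain ⟨N, hN⟩ : ∃ N : Nat, b = a + N := ⟨(b - a).toNat, by omega⟩
    subst hN
    induction N with
    | zero => simp at h
    | succ k ih =>
      have hk : a + (k + 1 : Nat) = (a + k) + 1 := by push_cast; ring
      rw [hk, PySem.List.pyRange_one_succ_right (by omega)]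
      by_cases hk0 : a < a + (k : Int)
      · rw [List.map_append, List.sum_append, ih hk0]
        rw [show (a + (k : Int)) + 1 - 1 = (a + k - 1) + 1 by ring,
            pv_Icc_succ_right (by omega), Finset.sum_insert (by simp [Finset.mem_Icc])]
        simp; ring
      · have hk0' : (k : Int) = 0 := by omega
        rw [hk0', show a + (0 : Int) = a from by ring] at *
        rw [PySem.List.pyRange_one_eq_nil (le_refl a)]
        simp [Finset.Icc_self]

-- `a ≤ isqrt q` is exactly `a² ≤ q`
lemma pv_le_sqrt_int {a q : Int} (ha : 0 ≤ a) (hq : 0 ≤ q) :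
    a ≤ (Nat.sqrt q.toNat : Int) ↔ a * a ≤ q := by
  rw [show a = (a.toNat : Int) from (Int.toNat_of_nonneg ha).symm]
  rw [Nat.cast_le, Nat.le_sqrt]
  constructor
  · intro h
    have := (Nat.cast_le (α := Int)).2 h
    push_cast at this
    omega
  · intro h
    have h1 : ((a.toNat * a.toNat : Nat) : Int) ≤ ((q.toNat : Nat) : Int) := by push_cast; omega
    exact_mod_cast h1

-- the pointwise correspondence between A's and B's tests, plus the a ≤ pvA bound
lemma pv_key (D a b : Int) (hD : D < 0) (ha : 1 ≤ a) :
    ((-a ≤ b ∧ b ≤ a) ∧ pvPA D a b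
      ↔ PySem.Int.mod (b * b - D) 4 = 0 ∧ max 1 |b| ≤ a ∧ a ≤ pvHi D b ∧ pvPB D b a) ∧
    ((max 1 |b| ≤ a ∧ a ≤ pvHi D b ∧ pvPB D b a) → a ≤ pvA D) := by
  have hbsq : 0 ≤ b * b := mul_self_nonneg b
  have hm : 0 < b * b - D := by omega
  have hq4 : PySem.Int.floordiv (b * b - D) 4 = (b * b - D) / 4 :=
    PySem.Int.floordiv_eq_ediv_of_pos (by norm_num)
  have hqnn : 0 ≤ (b * b - D) / 4 := Int.ediv_nonneg (by omega) (by norm_num)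
  have hqle : ((b * b - D) / 4) * 4 ≤ b * b - D := Int.ediv_mul_le _ (by norm_num)
  have hhi : a ≤ pvHi D b ↔ a * a ≤ (b * b - D) / 4 := by
    rw [pvHi, hq4]; exact pv_le_sqrt_int (by omega) hqnn
  constructor
  · constructor
    · rintro ⟨⟨hb1, hb2⟩, hmod, hcge, htie⟩
      rw [PySem.Int.mod_eq_zero_iff_dvd] at hmod
      obtain ⟨k, hk⟩ := hmod
      have hc_eq : PySem.Int.floordiv (b * b - D) (4 * a) = k := by
        rw [PySem.Int.floordiv_eq_ediv_of_pos (by omega), hk,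
          Int.mul_ediv_cancel_left _ (by omega)]
      rw [hc_eq] at hcge htie
      have hqak : (b * b - D) / 4 = a * k := by
        rw [hk, show 4 * a * k = 4 * (a * k) by ring, Int.mul_ediv_cancel_left _ (by norm_num)]
      refine ⟨?_, ?_, ?_, ?_, ?_⟩
      · rw [PySem.Int.mod_eq_zero_iff_dvd]; exact ⟨a * k, by rw [hk]; ring⟩
      · simp only [max_le_iff]; exact ⟨ha, abs_le.2 ⟨hb1, hb2⟩⟩
      · rw [hhi, hqak]; exact mul_le_mul_of_nonneg_left hcge (by omega)
      · rw [PySem.Int.mod_eq_zero_iff_dvd, hq4, hqak]; exact ⟨k, rfl⟩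
      · rw [hq4, hqak]
        by_cases htb : a = k
        · exact Or.inl (htie (by rw [htb]))
        · exact Or.inr fun hcon => htb (mul_left_cancel₀ (by omega) hcon)
    · rintro ⟨hmod4, hmax, hhia, hdvd, htie⟩
      rw [PySem.Int.mod_eq_zero_iff_dvd] at hmod4
      rw [PySem.Int.mod_eq_zero_iff_dvd, hq4] at hdvd
      obtain ⟨k, hk⟩ := hdvd
      have hmk : b * b - D = 4 * a * k := by
        have h4 : (b * b - D) / 4 * 4 = b * b - D := Int.ediv_mul_cancel hmod4
        rw [← h4, hk]; ring
      have hc_eq : PySem.Int.floordiv (b * b - D) (4 * a) = k := by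
        rw [PySem.Int.floordiv_eq_ediv_of_pos (by omega), hmk,
          Int.mul_ediv_cancel_left _ (by omega)]
      have hak : a ≤ k := by
        have := (hhi.1 hhia).trans_eq hk
        exact le_of_mul_le_mul_left this (by omega)
      have habs : |b| ≤ a := le_of_max_le_right hmax
      refine ⟨⟨(abs_le.1 habs).1, (abs_le.1 habs).2⟩, ?_, ?_, ?_⟩
      · rw [PySem.Int.mod_eq_zero_iff_dvd, hmk]; exact ⟨k, rfl⟩
      · rw [hc_eq]; exact hak
      · rw [hc_eq]; intro hake
        rcases htie with h | h
        · exact h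
        · exact absurd (by rw [hq4, hk, hake]) h
  · rintro ⟨hmax, hhia, _, _⟩
    have habs : |b| ≤ a := le_of_max_le_right hmax
    have hbb : b * b ≤ a * a := by
      calc b * b = |b| * |b| := (abs_mul_abs_self b).symm
        _ ≤ a * a := mul_self_le_mul_self (abs_nonneg b) habs
    have haq : a * a ≤ (b * b - D) / 4 := hhi.1 hhia
    have hnab : (D.natAbs : Int) = -D := by omega
    rw [pvA]
    have := pv_le_sqrt_int (a := a) (q := (D.natAbs : Int)) (by omega) (by omega)
    rw [Int.toNat_natCast] at this
    exact this.2 (by omega)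

lemma pv_portA_eval (n : Int) (hn : ¬ n ≤ 0) :
    class_number_neg n
      = max (∑ a ∈ Finset.Icc 1 (pvA (pvD n)), ∑ b ∈ Finset.Icc (-a) a, pvFA (pvD n) a b) 1 := by
  rw [class_number_neg, if_neg hn]
  have hbody : ∀ a : Int,
      (fun (h b : Int) =>
        if PySem.Int.mod (b * b - pvD n) (4 * a) = 0 then
          if PySem.Int.floordiv (b * b - pvD n) (4 * a) ≥ a ∧
             (if a = PySem.Int.floordiv (b * b - pvD n) (4 * a) then b ≥ 0 else True)
          then h + 1 else h
        else h)
      = fun h b => h + pvFA (pvD n) a b := by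
    intro a; funext h b
    simp only [pvFA, pvPA, ge_iff_le]
    split_ifs <;> first | omega | tauto
  have hinner : ∀ (a h : Int),
      (PySem.List.pyRange (-a) (a + 1) 1).foldl (fun h b =>
          if PySem.Int.mod (b * b - pvD n) (4 * a) = 0 then
            if PySem.Int.floordiv (b * b - pvD n) (4 * a) ≥ a ∧
               (if a = PySem.Int.floordiv (b * b - pvD n) (4 * a) then b ≥ 0 else True)
            then h + 1 else h
          else h) h
        = h + ∑ b ∈ Finset.Icc (-a) a, pvFA (pvD n) a b := by
    intro a h
    rw [hbody a, PySem.List.foldl_add, pv_sum_pyRange, show a + 1 - 1 = a by ring]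
  show max _ 1 = _
  congr 1
  show (PySem.List.pyRange 1 (pvA (pvD n) + 1) 1).foldl (fun h a =>
        (PySem.List.pyRange (-a) (a + 1) 1).foldl (fun h b =>
          if PySem.Int.mod (b * b - pvD n) (4 * a) = 0 then
            if PySem.Int.floordiv (b * b - pvD n) (4 * a) ≥ a ∧
               (if a = PySem.Int.floordiv (b * b - pvD n) (4 * a) then b ≥ 0 else True)
            then h + 1 else h
          else h) h) 0 = _
  calc (PySem.List.pyRange 1 (pvA (pvD n) + 1) 1).foldl (fun h a =>
        (PySem.List.pyRange (-a) (a + 1) 1).foldl (fun h b =>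
          if PySem.Int.mod (b * b - pvD n) (4 * a) = 0 then
            if PySem.Int.floordiv (b * b - pvD n) (4 * a) ≥ a ∧
               (if a = PySem.Int.floordiv (b * b - pvD n) (4 * a) then b ≥ 0 else True)
            then h + 1 else h
          else h) h) 0
      = (PySem.List.pyRange 1 (pvA (pvD n) + 1) 1).foldl
          (fun h a => h + ∑ b ∈ Finset.Icc (-a) a, pvFA (pvD n) a b) 0 := by
        have heq : (fun (h a : Int) =>
            (PySem.List.pyRange (-a) (a + 1) 1).foldl (fun h b =>
              if PySem.Int.mod (b * b - pvD n) (4 * a) = 0 then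
                if PySem.Int.floordiv (b * b - pvD n) (4 * a) ≥ a ∧
                   (if a = PySem.Int.floordiv (b * b - pvD n) (4 * a) then b ≥ 0 else True)
                then h + 1 else h
              else h) h)
            = fun h a => h + ∑ b ∈ Finset.Icc (-a) a, pvFA (pvD n) a b :=
          funext fun h => funext fun a => hinner a h
        rw [heq]
    _ = ∑ a ∈ Finset.Icc 1 (pvA (pvD n)), ∑ b ∈ Finset.Icc (-a) a, pvFA (pvD n) a b := by
        rw [PySem.List.foldl_add, pv_sum_pyRange, show pvA (pvD n) + 1 - 1 = pvA (pvD n) by ring,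
          zero_add]

lemma pv_portB_eval (n : Int) (hn : ¬ n ≤ 0) :
    class_number_neg_alt n
      = max (∑ b ∈ Finset.Icc (-(pvA (pvD n))) (pvA (pvD n)),
          (if PySem.Int.mod (b * b - pvD n) 4 ≠ 0 then 0
           else ∑ a ∈ Finset.Icc (max 1 |b|) (pvHi (pvD n) b), pvFB (pvD n) b a)) 1 := by
  rw [class_number_neg_alt, if_neg hn]
  have hinner : ∀ (b h : Int),
      (PySem.List.pyRange (max 1 |b|) ((Nat.sqrt (PySem.Int.floordiv (b * b - pvD n) 4).toNat : Int) + 1) 1).foldl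
          (fun h a =>
            if PySem.Int.mod (PySem.Int.floordiv (b * b - pvD n) 4) a = 0 ∧
               (b ≥ 0 ∨ a * a ≠ PySem.Int.floordiv (b * b - pvD n) 4)
            then h + 1 else h) h
        = h + ∑ a ∈ Finset.Icc (max 1 |b|) (pvHi (pvD n) b), pvFB (pvD n) b a := by
    intro b h
    have hb : (fun (h a : Int) =>
        if PySem.Int.mod (PySem.Int.floordiv (b * b - pvD n) 4) a = 0 ∧
           (b ≥ 0 ∨ a * a ≠ PySem.Int.floordiv (b * b - pvD n) 4)
        then h + 1 else h)
        = fun h a => h + pvFB (pvD n) b a := by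
      funext h a
      simp only [pvFB, pvPB, ge_iff_le]
      split_ifs <;> omega
    rw [hb, PySem.List.foldl_add, pv_sum_pyRange, pvHi,
      show ((Nat.sqrt (PySem.Int.floordiv (b * b - pvD n) 4).toNat : Int) + 1) - 1
        = (Nat.sqrt (PySem.Int.floordiv (b * b - pvD n) 4).toNat : Int) by ring]
  show max _ 1 = _
  congr 1
  show (PySem.List.pyRange (-(pvA (pvD n))) (pvA (pvD n) + 1) 1).foldl (fun h b =>
        if PySem.Int.mod (b * b - pvD n) 4 ≠ 0 then h
        else
          (PySem.List.pyRange (max 1 |b|) ((Nat.sqrt (PySem.Int.floordiv (b * b - pvD n) 4).toNat : Int) + 1) 1).foldl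
            (fun h a =>
              if PySem.Int.mod (PySem.Int.floordiv (b * b - pvD n) 4) a = 0 ∧
                 (b ≥ 0 ∨ a * a ≠ PySem.Int.floordiv (b * b - pvD n) 4)
              then h + 1 else h) h) 0 = _
  have heq : (fun (h b : Int) =>
      if PySem.Int.mod (b * b - pvD n) 4 ≠ 0 then h
      else
        (PySem.List.pyRange (max 1 |b|) ((Nat.sqrt (PySem.Int.floordiv (b * b - pvD n) 4).toNat : Int) + 1) 1).foldl
          (fun h a =>
            if PySem.Int.mod (PySem.Int.floordiv (b * b - pvD n) 4) a = 0 ∧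
               (b ≥ 0 ∨ a * a ≠ PySem.Int.floordiv (b * b - pvD n) 4)
            then h + 1 else h) h)
      = fun h b => h + (if PySem.Int.mod (b * b - pvD n) 4 ≠ 0 then 0
          else ∑ a ∈ Finset.Icc (max 1 |b|) (pvHi (pvD n) b), pvFB (pvD n) b a) := by
    funext h b
    by_cases hm : PySem.Int.mod (b * b - pvD n) 4 ≠ 0
    · rw [if_pos hm, if_pos hm]; ring
    · rw [if_neg hm, if_neg hm, hinner b h]
  rw [heq, PySem.List.foldl_add, pv_sum_pyRange, show pvA (pvD n) + 1 - 1 = pvA (pvD n) by ring,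
    zero_add]

-- the loop interchange: A's double count equals B's double count
lemma pv_main (D : Int) (hD : D < 0) :
    ∑ a ∈ Finset.Icc 1 (pvA D), ∑ b ∈ Finset.Icc (-a) a, pvFA D a b
      = ∑ b ∈ Finset.Icc (-(pvA D)) (pvA D),
          (if PySem.Int.mod (b * b - D) 4 ≠ 0 then 0
           else ∑ a ∈ Finset.Icc (max 1 |b|) (pvHi D b), pvFB D b a) := by
  have step1 : ∑ a ∈ Finset.Icc 1 (pvA D), ∑ b ∈ Finset.Icc (-a) a, pvFA D a b
      = ∑ a ∈ Finset.Icc 1 (pvA D), ∑ b ∈ Finset.Icc (-(pvA D)) (pvA D),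
          (if -a ≤ b ∧ b ≤ a then pvFA D a b else 0) := by
    refine Finset.sum_congr rfl (fun a hma => ?_)
    rw [Finset.mem_Icc] at hma
    have e1 : ∑ b ∈ Finset.Icc (-a) a, pvFA D a b
        = ∑ b ∈ Finset.Icc (-a) a, (if -a ≤ b ∧ b ≤ a then pvFA D a b else 0) :=
      Finset.sum_congr rfl (fun x hmx => by rw [Finset.mem_Icc] at hmx; rw [if_pos (by omega)])
    rw [e1]
    exact Finset.sum_subset (Finset.Icc_subset_Icc (by omega) (by omega))
      (fun x _ hnx => by rw [Finset.mem_Icc] at hnx; rw [if_neg (by omega)])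
  rw [step1, Finset.sum_comm]
  refine Finset.sum_congr rfl ?_
  intro b _
  have L1 : ∀ a ∈ Finset.Icc 1 (pvA D),
      (if -a ≤ b ∧ b ≤ a then pvFA D a b else 0)
        = (if PySem.Int.mod (b * b - D) 4 = 0 ∧ max 1 |b| ≤ a ∧ a ≤ pvHi D b ∧ pvPB D b a
           then 1 else 0) := by
    intro a hma
    rw [Finset.mem_Icc] at hma
    have hk := pv_key D a b hD (by omega)
    by_cases hc : (-a ≤ b ∧ b ≤ a) ∧ pvPA D a b
    · rw [if_pos hc.1, pvFA, if_pos hc.2, if_pos (hk.1.1 hc)]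
    · rw [if_neg (fun h => hc (hk.1.2 h))]
      by_cases hbb : -a ≤ b ∧ b ≤ a
      · rw [if_pos hbb, pvFA, if_neg (fun hp => hc ⟨hbb, hp⟩)]
      · rw [if_neg hbb]
  rw [Finset.sum_congr rfl L1]
  have hsub1 : Finset.Icc 1 (pvA D) ⊆ Finset.Icc 1 (max (pvA D) (pvHi D b)) :=
    Finset.Icc_subset_Icc (le_refl _) (le_max_left _ _)
  rw [Finset.sum_subset hsub1 (fun a hma hna => ?_)]
  swap
  · rw [Finset.mem_Icc] at hma hna
    refine if_neg (fun h => ?_)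
    have := (pv_key D a b hD (by omega)).2 ⟨h.2.1, h.2.2.1, h.2.2.2⟩
    omega
  by_cases hm4 : PySem.Int.mod (b * b - D) 4 = 0
  · rw [if_neg (by omega : ¬ PySem.Int.mod (b * b - D) 4 ≠ 0)]
    have hsub2 : Finset.Icc (max 1 |b|) (pvHi D b) ⊆ Finset.Icc 1 (max (pvA D) (pvHi D b)) := by
      intro x hx
      rw [Finset.mem_Icc] at hx ⊢
      constructor
      · have : (1 : Int) ≤ max 1 |b| := le_max_left _ _
        omega
      · exact hx.2.trans (le_max_right _ _)
    have e2 : ∑ a ∈ Finset.Icc (max 1 |b|) (pvHi D b),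
          (if PySem.Int.mod (b * b - D) 4 = 0 ∧ max 1 |b| ≤ a ∧ a ≤ pvHi D b ∧ pvPB D b a
           then (1 : Int) else 0)
        = ∑ a ∈ Finset.Icc 1 (max (pvA D) (pvHi D b)),
          (if PySem.Int.mod (b * b - D) 4 = 0 ∧ max 1 |b| ≤ a ∧ a ≤ pvHi D b ∧ pvPB D b a
           then (1 : Int) else 0) :=
      Finset.sum_subset hsub2 (fun a _ hna =>
        if_neg (fun h => hna (Finset.mem_Icc.2 ⟨h.2.1, h.2.2.1⟩)))
    rw [← e2]
    refine Finset.sum_congr rfl (fun a hma => ?_)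
    rw [Finset.mem_Icc] at hma
    rw [pvFB]
    by_cases hp : pvPB D b a
    · rw [if_pos ⟨hm4, hma.1, hma.2, hp⟩, if_pos hp]
    · rw [if_neg (fun h => hp h.2.2.2), if_neg hp]
  · rw [if_pos hm4]
    exact Finset.sum_eq_zero (fun a _ => if_neg (fun h => hm4 h.1))

lemma pv_D_neg (n : Int) (hn : ¬ n ≤ 0) : pvD n < 0 := by
  unfold pvD; split <;> omega

-- ===== VERDICT (by name: the statement is the Claim_ definition above) =====
theorem class_number_neg_spec : Claim_equal_class_number_neg := by
  intro n _
  unfold Spec_class_number_neg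
  by_cases hn : n ≤ 0
  · simp [class_number_neg, class_number_neg_alt, hn]
  · rw [pv_portA_eval n hn, pv_portB_eval n hn, pv_main (pvD n) (pv_D_neg n hn)]
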